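-- pv_equiv track=rewrite | github.com/InferenceBrake/inference-brake-platform | packages/engine/inferencebrake/detectors/action.py | _find_direct_repeat
-- ===== SOURCE A (Python) =====
-- def _find_direct_repeat(actions: list[str], min_count: int) -> tuple[str, int] | None:
--     """
--     Find an action repeated consecutively >= min_count times.
--     Returns (action, count) or None.
--     """
--     if not actions:
--         return None
--     current = actions[-1]
--     count = 0
--     for a in reversed(actions):
--         if a == current:
--             count += 1
--         else:
--             break
--     if count >= min_count:
--         return current, count
--     return None
-- ===== SOURCE B (Python) =====
-- def _find_direct_repeat(actions, min_count):
--     """Single forward pass: maintain the current run (action, length); the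
--     state after the loop is exactly the trailing run."""
--     state = None  # (action, run length) of the run currently being read
--     for a in actions:
--         if state is not None and a == state[0]:
--             state = (state[0], state[1] + 1)
--         else:
--             state = (a, 1)
--     if state is not None and state[1] >= min_count:
--         return state
--     return None
-- ===== Notes on version B (the rewrite author's own statement) =====
-- stated objective: alternative
-- what changed: B replaces A's backward scan with early break (indexing actions[-1], then reversed iteration) by a single forward fold that maintains the current run (action, length); the post-loop state is the trailing run.
import Mathlib
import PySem

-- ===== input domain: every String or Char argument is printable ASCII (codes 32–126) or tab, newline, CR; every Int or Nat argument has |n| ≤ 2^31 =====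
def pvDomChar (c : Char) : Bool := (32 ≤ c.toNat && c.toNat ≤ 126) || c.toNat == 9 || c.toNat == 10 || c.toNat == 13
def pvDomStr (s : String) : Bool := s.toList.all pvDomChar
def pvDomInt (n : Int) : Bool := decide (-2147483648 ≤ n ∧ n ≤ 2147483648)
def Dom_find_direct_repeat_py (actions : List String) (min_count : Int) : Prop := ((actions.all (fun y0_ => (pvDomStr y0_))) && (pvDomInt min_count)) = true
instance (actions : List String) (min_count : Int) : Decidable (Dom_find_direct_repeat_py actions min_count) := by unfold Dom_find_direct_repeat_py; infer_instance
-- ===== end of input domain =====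

-- B replaces A's backward scan-with-break by a single forward fold maintaining the current run; same results, proved equal.


-- ===== PORT A =====
-- A's 'for a in reversed(actions): if a == current: count += 1 else: break'
def aCountLoop : List String → String → Int → Int
  | [], _, count => count
  | a :: rest, current, count =>
      if a = current then aCountLoop rest current (count + 1) else count

def find_direct_repeat_py (actions : List String) (min_count : Int) : Option (String × Int) :=
  if actions = [] then none
  else
    match PySem.List.pyGet? actions (-1) with
    | none => none
    | some current =>
        let count := aCountLoop actions.reverse current 0
        if count ≥ min_count then some (current, count) else none

-- ===== PORT B =====
-- Source B's forward loop: state = none, or some (action, run length) of the run being read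
def bLoop : List String → Option (String × Int) → Option (String × Int)
  | [], st => st
  | a :: rest, st =>
      match st with
      | some (last, run) =>
          if a = last then bLoop rest (some (last, run + 1))
          else bLoop rest (some (a, 1))
      | none => bLoop rest (some (a, 1))

def find_direct_repeat_py_alt (actions : List String) (min_count : Int) : Option (String × Int) :=
  match bLoop actions none with
  | none => none
  | some (last, run) => if run ≥ min_count then some (last, run) else none

-- ===== PRECONDITION & SPEC =====
def Spec_find_direct_repeat_py (actions : List String) (min_count : Int) (out : Option (String × Int)) : Prop := out = find_direct_repeat_py_alt actions min_count
instance (actions : List String) (min_count : Int) (out : Option (String × Int)) : Decidable (Spec_find_direct_repeat_py actions min_count out) := by unfold Spec_find_direct_repeat_py; infer_instance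

-- ===== CLAIM (what is proved, stated in full; the proofs are below) =====
def Claim_equal_find_direct_repeat_py : Prop := ∀ (actions : List String) (min_count : Int), Dom_find_direct_repeat_py actions min_count → Spec_find_direct_repeat_py actions min_count (find_direct_repeat_py actions min_count)

-- ===== LEMMAS AND PROOFS =====

theorem aCountLoop_acc (l : List String) (c : String) (acc : Int) :
    aCountLoop l c acc = acc + aCountLoop l c 0 := by
  induction l generalizing acc with
  | nil => simp [aCountLoop]
  | cons a rest ih =>
    simp only [aCountLoop]
    by_cases h : a = c
    · simp only [if_pos h]
      rw [ih (acc + 1), ih (0 + 1)]; ring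
    · simp [h]

theorem bLoop_append_singleton (xs : List String) (a : String) (st : Option (String × Int)) :
    bLoop (xs ++ [a]) st =
      match bLoop xs st with
      | none => some (a, 1)
      | some (l, r) => if a = l then some (l, r + 1) else some (a, 1) := by
  induction xs generalizing st with
  | nil =>
    cases st with
    | none => simp [bLoop]
    | some p =>
      obtain ⟨l, r⟩ := p
      by_cases h : a = l <;> simp [bLoop, h]
  | cons x rest ih =>
    cases st with
    | none => simpa [bLoop] using ih (some (x, 1))
    | some p =>
      obtain ⟨l, r⟩ := p
      by_cases h : x = l <;> simp [bLoop, h, ih]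

theorem pyGet_neg_one (xs : List String) (h : xs ≠ []) :
    PySem.List.pyGet? xs (-1) = some (xs.getLast h) := by
  have hlen : 0 < xs.length := List.length_pos_iff.mpr h
  simp only [PySem.List.pyGet?, PySem.List.pyIdx?]
  split_ifs with h1 h2 h3
  · omega
  · omega
  · show xs[xs.length - (-(-1:Int)).toNat]? = some (xs.getLast h)
    rw [List.getLast_eq_getElem, List.getElem?_eq_getElem (by simp; omega)]
    simp
  · omega

theorem aCountLoop_head_ne (c : String) (l : String) (rest : List String) (h : c ≠ l) :
    aCountLoop (l :: rest) c 0 = 0 := by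
  simp [aCountLoop, Ne.symm h]

theorem bLoop_char (xs : List String) (h : xs ≠ []) :
    bLoop xs none = some (xs.getLast h, aCountLoop xs.reverse (xs.getLast h) 0) := by
  induction xs using List.reverseRecOn with
  | nil => exact absurd rfl h
  | append_singleton ys a ih =>
    rw [bLoop_append_singleton]
    by_cases hys : ys = []
    · subst hys
      simp [bLoop, aCountLoop]
    · rw [ih hys]
      simp only [List.getLast_append_singleton, List.reverse_append, List.reverse_cons,
        List.reverse_nil, List.nil_append, List.cons_append]
      by_cases ha : a = ys.getLast hys
      · simp only [ha, if_true]
        have : aCountLoop (ys.getLast hys :: ys.reverse) (ys.getLast hys) 0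
            = aCountLoop ys.reverse (ys.getLast hys) 1 := by
          simp [aCountLoop]
        rw [this, aCountLoop_acc ys.reverse (ys.getLast hys) 1]
        simp [Int.add_comm]
      · simp only [if_neg ha]
        have hrev : ys.reverse = ys.getLast hys :: (ys.dropLast).reverse := by
          conv_lhs => rw [← List.dropLast_append_getLast hys]
          simp
        have h1 : aCountLoop (a :: ys.reverse) a 0 = aCountLoop ys.reverse a 1 := by
          simp [aCountLoop]
        rw [h1, aCountLoop_acc, hrev, aCountLoop_head_ne _ _ _ ha]
        norm_num

-- ===== VERDICT (by name: the statement is the Claim_ definition above) =====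
theorem find_direct_repeat_py_spec : Claim_equal_find_direct_repeat_py := by
  intro actions min_count _
  unfold Spec_find_direct_repeat_py find_direct_repeat_py find_direct_repeat_py_alt
  by_cases h : actions = []
  · subst h; simp [bLoop]
  · rw [if_neg h, pyGet_neg_one actions h, bLoop_char actions h]
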